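-- pv_equiv track=rewrite | github.com/semenko/rseqc-redux | rseqc/bam_cigar.py | fetch_exon
-- ===== SOURCE A (Python) =====
-- def fetch_exon(chrom: str, st: int, cigar: list[tuple[int, int]]) -> list[tuple[str, int, int]]:
--     """fetch exon regions defined by cigar. st must be zero based
--     return list of tuple of (chrom,st, end)
--     """
--     # match = re.compile(r'(\d+)(\D)')
--     chrom_st = st
--     exon_bound = []
--     for c, s in cigar:  # code and size
--         if c == 0:  # match
--             exon_bound.append((chrom, chrom_st, chrom_st + s))
--             chrom_st += s
--         elif c == 1:  # insertion to ref
--             continue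
--         elif c == 2:  # deletion to ref
--             chrom_st += s
--         elif c == 3:  # gap or intron
--             chrom_st += s
--         elif c == 4:  # soft clipping. We do NOT include soft clip as part of exon
--             chrom_st += s
--         else:
--             continue
--     return exon_bound
-- ===== SOURCE B (Python) =====
-- def fetch_exon(chrom: str, st: int, cigar: list[tuple[int, int]]) -> list[tuple[str, int, int]]:
--     """fetch exon regions defined by cigar. st must be zero based
--     return list of tuple of (chrom,st, end)
--     """
--     # prefix sums of reference-consuming op lengths give the start in effect at each op
--     starts = [st]
--     for c, s in cigar:
--         starts.append(starts[-1] + (s if c in (0, 2, 3, 4) else 0))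
--     return [(chrom, p, p + s) for (c, s), p in zip(cigar, starts) if c == 0]
-- ===== Notes on version B (the rewrite author's own statement) =====
-- stated objective: alternative
-- what changed: Replaces the single stateful accumulator loop by a prefix-sum table of per-op reference deltas followed by a separate filtering comprehension that emits match ops.
import Mathlib
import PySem

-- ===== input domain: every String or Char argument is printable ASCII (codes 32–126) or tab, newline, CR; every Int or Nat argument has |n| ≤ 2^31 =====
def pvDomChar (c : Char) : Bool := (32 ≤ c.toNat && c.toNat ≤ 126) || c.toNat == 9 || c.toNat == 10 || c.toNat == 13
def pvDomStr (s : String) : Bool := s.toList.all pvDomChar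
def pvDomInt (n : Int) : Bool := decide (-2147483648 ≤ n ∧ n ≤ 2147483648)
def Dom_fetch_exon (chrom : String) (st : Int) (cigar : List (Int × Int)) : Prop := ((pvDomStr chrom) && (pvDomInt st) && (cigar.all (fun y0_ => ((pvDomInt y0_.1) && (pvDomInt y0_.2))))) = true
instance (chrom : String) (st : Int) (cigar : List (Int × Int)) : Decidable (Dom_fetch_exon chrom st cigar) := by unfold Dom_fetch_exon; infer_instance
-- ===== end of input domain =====

-- B replaces A's stateful accumulator loop by a prefix-sum table of deltas plus a filtering pass (alternative decomposition, same cost).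

-- ===== PORT A =====
-- the for-loop as structural recursion over the same state (chrom_st, exon_bound)
def fetch_exon_go (chrom : String) (chrom_st : Int)
    (exon_bound : List (String × Int × Int)) : List (Int × Int) → List (String × Int × Int)
  | [] => exon_bound
  | (c, s) :: rest =>
    if c = 0 then fetch_exon_go chrom (chrom_st + s) (exon_bound ++ [(chrom, chrom_st, chrom_st + s)]) rest
    else if c = 1 then fetch_exon_go chrom chrom_st exon_bound rest
    else if c = 2 then fetch_exon_go chrom (chrom_st + s) exon_bound rest
    else if c = 3 then fetch_exon_go chrom (chrom_st + s) exon_bound rest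
    else if c = 4 then fetch_exon_go chrom (chrom_st + s) exon_bound rest
    else fetch_exon_go chrom chrom_st exon_bound rest

def fetch_exon (chrom : String) (st : Int) (cigar : List (Int × Int)) : List (String × Int × Int) :=
  fetch_exon_go chrom st [] cigar

-- ===== PORT B =====
-- per-op reference delta: `s if c in (0,2,3,4) else 0`
def pvDelta (cs : Int × Int) : Int :=
  if cs.1 = 0 ∨ cs.1 = 2 ∨ cs.1 = 3 ∨ cs.1 = 4 then cs.2 else 0

def fetch_exon_alt (chrom : String) (st : Int) (cigar : List (Int × Int)) : List (String × Int × Int) :=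
  let starts := List.scanl (fun p cs => p + pvDelta cs) st cigar
  (cigar.zip starts).filterMap (fun x => if x.1.1 = 0 then some (chrom, x.2, x.2 + x.1.2) else none)

-- ===== PRECONDITION & SPEC =====
def Spec_fetch_exon (chrom : String) (st : Int) (cigar : List (Int × Int)) (out : List (String × Int × Int)) : Prop := out = fetch_exon_alt chrom st cigar
instance (chrom : String) (st : Int) (cigar : List (Int × Int)) (out : List (String × Int × Int)) : Decidable (Spec_fetch_exon chrom st cigar out) := by unfold Spec_fetch_exon; infer_instance

-- ===== CLAIM (what is proved, stated in full; the proofs are below) =====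
def Claim_equal_fetch_exon : Prop := ∀ (chrom : String) (st : Int) (cigar : List (Int × Int)), Dom_fetch_exon chrom st cigar → Spec_fetch_exon chrom st cigar (fetch_exon chrom st cigar)

-- ===== LEMMAS AND PROOFS =====

theorem fetch_exon_go_eq_alt (chrom : String) (cigar : List (Int × Int)) :
    ∀ (st : Int) (acc : List (String × Int × Int)),
      fetch_exon_go chrom st acc cigar = acc ++ fetch_exon_alt chrom st cigar := by
  induction cigar with
  | nil => intro st acc; simp [fetch_exon_go, fetch_exon_alt]
  | cons hd tl ih =>
    intro st acc
    obtain ⟨c, s⟩ := hd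
    by_cases h0 : c = 0
    · simp [fetch_exon_go, fetch_exon_alt, h0, ih, pvDelta, List.scanl]
    · by_cases h1 : c = 1
      · simp [fetch_exon_go, fetch_exon_alt, h1, ih, pvDelta, List.scanl]
      · by_cases h2 : c = 2
        · simp [fetch_exon_go, fetch_exon_alt, h2, ih, pvDelta, List.scanl]
        · by_cases h3 : c = 3
          · simp [fetch_exon_go, fetch_exon_alt, h3, ih, pvDelta, List.scanl]
          · by_cases h4 : c = 4
            · simp [fetch_exon_go, fetch_exon_alt, h4, ih, pvDelta, List.scanl]
            · simp [fetch_exon_go, fetch_exon_alt, h0, h1, h2, h3, h4, ih, pvDelta, List.scanl]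

-- ===== VERDICT (by name: the statement is the Claim_ definition above) =====
theorem fetch_exon_spec : Claim_equal_fetch_exon := by
  intro chrom st cigar _
  unfold Spec_fetch_exon fetch_exon
  simpa using fetch_exon_go_eq_alt chrom cigar st []
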